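-- pv_equiv track=rewrite | github.com/Jos3manuelfig/Algoritmia-python-varios | conjuntos.py | custom_array_operation
-- ===== SOURCE A (Python) =====
-- def custom_array_operation(arr1, arr2, find_common):
--     # Inicializa el array de resultado
--     result = []
--
--     # Si find_common es True, busca los elementos comunes
--     if find_common:
--         # Itera sobre el primer array
--         for element in arr1:
--             # Si el elemento está en ambos arrays y no está en el resultado, agrégalo al resultado
--             if element in arr2 and element not in result:
--                 result.append(element)
--     else:
--         # Si find_common es False, busca los elementos no comunes
--         # Itera sobre ambos arrays
--         for element in arr1 + arr2:
--             # Si el elemento es único en uno de los arrays, agrégalo al resultado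
--             if (element in arr1) != (element in arr2) and element not in result:
--                 result.append(element)
--
--     # Retorna el array de resultado
--     return result
-- ===== SOURCE B (Python) =====
-- def custom_array_operation(arr1, arr2, find_common):
--     # Stage 1: order-preserving dedup via dict.fromkeys; Stage 2: filter by set membership.
--     u1 = list(dict.fromkeys(arr1))
--     s2 = set(arr2)
--     if find_common:
--         return [x for x in u1 if x in s2]
--     u2 = list(dict.fromkeys(arr2))
--     s1 = set(arr1)
--     return [x for x in u1 if x not in s2] + [x for x in u2 if x not in s1]
-- ===== Notes on version B (the rewrite author's own statement) =====
-- stated objective: faster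
-- what changed: B replaces A's accumulator loop (testing 'not in result' on each step, over arr1 or over arr1+arr2 with an XOR membership test) by a staged pipeline: first an order-preserving dedup of each input via dict.fromkeys, then plain set-membership filter comprehensions, concatenating the two filtered deduped lists in the symmetric-difference case.
import Mathlib
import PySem

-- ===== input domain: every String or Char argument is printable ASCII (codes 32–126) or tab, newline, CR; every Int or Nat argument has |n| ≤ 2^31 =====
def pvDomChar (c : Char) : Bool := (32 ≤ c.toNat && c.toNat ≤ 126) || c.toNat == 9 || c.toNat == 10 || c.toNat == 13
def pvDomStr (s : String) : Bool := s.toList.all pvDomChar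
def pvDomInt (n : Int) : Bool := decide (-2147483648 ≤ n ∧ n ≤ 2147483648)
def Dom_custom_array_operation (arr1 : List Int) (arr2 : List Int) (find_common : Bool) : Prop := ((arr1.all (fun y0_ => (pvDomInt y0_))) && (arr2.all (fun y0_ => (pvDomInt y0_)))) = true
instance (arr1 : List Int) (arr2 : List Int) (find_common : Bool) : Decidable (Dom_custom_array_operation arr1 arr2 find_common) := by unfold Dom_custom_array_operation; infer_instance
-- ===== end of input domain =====

-- B replaces A's accumulator loop (dedup-during-iteration against the result list) by a staged
-- pipeline: order-preserving dedup of each input first (dict.fromkeys), then set-membership filters.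
-- ===== PORT A =====
def custom_array_operation (arr1 : List Int) (arr2 : List Int) (find_common : Bool) : List Int :=
  if find_common then
    arr1.foldl (fun result element =>
      if arr2.contains element && !(result.contains element) then result ++ [element] else result) []
  else
    (arr1 ++ arr2).foldl (fun result element =>
      if (arr1.contains element != arr2.contains element) && !(result.contains element) then
        result ++ [element] else result) []

-- ===== PORT B =====
def custom_array_operation_alt (arr1 : List Int) (arr2 : List Int) (find_common : Bool) : List Int :=
  let u1 := PySem.List.dedup arr1
  let s2 : PySem.Set Int := PySem.Set.ofList arr2
  if find_common then
    u1.filter (fun x => PySem.Set.contains s2 x)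
  else
    let u2 := PySem.List.dedup arr2
    let s1 : PySem.Set Int := PySem.Set.ofList arr1
    u1.filter (fun x => !(PySem.Set.contains s2 x)) ++ u2.filter (fun x => !(PySem.Set.contains s1 x))

-- ===== PRECONDITION & SPEC =====
def Spec_custom_array_operation (arr1 : List Int) (arr2 : List Int) (find_common : Bool) (out : List Int) : Prop := out = custom_array_operation_alt arr1 arr2 find_common
instance (arr1 : List Int) (arr2 : List Int) (find_common : Bool) (out : List Int) : Decidable (Spec_custom_array_operation arr1 arr2 find_common out) := by unfold Spec_custom_array_operation; infer_instance

-- ===== CLAIM (what is proved, stated in full; the proofs are below) =====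
def Claim_equal_custom_array_operation : Prop := ∀ (arr1 : List Int) (arr2 : List Int) (find_common : Bool), Dom_custom_array_operation arr1 arr2 find_common → Spec_custom_array_operation arr1 arr2 find_common (custom_array_operation arr1 arr2 find_common)

-- ===== LEMMAS AND PROOFS =====

/-- Membership in a `PySem.Set` built from a list coincides with list membership. -/
theorem cao_contains_ofList (l : List Int) (x : Int) :
    PySem.Set.contains (PySem.Set.ofList l) x = l.contains x := by
  cases h : l.contains x
  · simp only [List.contains_eq_mem, decide_eq_false_iff_not] at h
    simp [PySem.Set.contains_eq_listContains, List.contains_eq_mem,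
      PySem.Set.mem_ofList, h]
  · simp only [List.contains_eq_mem, decide_eq_true_eq] at h
    simp [PySem.Set.contains_eq_listContains, List.contains_eq_mem,
      PySem.Set.mem_ofList, h]

/-- `PySem.List.dedup` is exactly the "append if absent" fold A's dedup-against-result mirrors. -/
theorem cao_dedup_eq_foldl (xs : List Int) :
    PySem.List.dedup xs
      = xs.foldl (fun t x => if t.contains x then t else t ++ [x]) [] := rfl

/-- A's filtered dedup-during-iteration loop, started on `pre ++ s.filter p` with `pre` disjoint
from the remaining input, equals `pre` followed by a dedup fold of the input filtered by `p`. -/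
theorem cao_fold_filter (p : Int → Bool) (xs : List Int) :
    ∀ (s pre : List Int), (∀ x ∈ xs, x ∉ pre) →
    xs.foldl (fun result element =>
        if p element && !(result.contains element) then result ++ [element] else result)
      (pre ++ s.filter p)
    = pre ++ (xs.foldl (fun t x => if t.contains x then t else t ++ [x]) s).filter p := by
  induction xs with
  | nil => intro s pre _; rfl
  | cons a t ih =>
    intro s pre hdisj
    have hdisj' : ∀ x ∈ t, x ∉ pre := fun x hx => hdisj x (List.mem_cons_of_mem _ hx)
    have hnp : a ∉ pre := hdisj a (List.mem_cons_self ..)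
    simp only [List.foldl_cons]
    by_cases hs : s.contains a = true
    · have hmem : a ∈ s := by simpa [List.contains_eq_mem] using hs
      have hA : (p a && !((pre ++ s.filter p).contains a)) = false := by
        by_cases hp : p a = true
        · have hc : (pre ++ s.filter p).contains a = true := by
            rw [List.contains_eq_mem]
            exact decide_eq_true (List.mem_append_right _ (List.mem_filter.mpr ⟨hmem, hp⟩))
          rw [hc]; simp
        · simp [Bool.eq_false_iff.mpr hp]
      rw [hA, if_pos hs]
      simp only [Bool.false_eq_true, if_false]
      exact ih s pre hdisj'
    · have hns : a ∉ s := by simpa [List.contains_eq_mem] using hs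
      rw [if_neg hs]
      by_cases hp : p a = true
      · have hnres : a ∉ pre ++ s.filter p := by
          intro h
          rcases List.mem_append.mp h with h | h
          · exact hnp h
          · exact hns (List.mem_filter.mp h).1
        have hc : (pre ++ s.filter p).contains a = false := by
          rw [List.contains_eq_mem]; exact decide_eq_false hnres
        have hA : (p a && !((pre ++ s.filter p).contains a)) = true := by rw [hc]; simp [hp]
        rw [hA]
        simp only [if_true]
        rw [show (pre ++ s.filter p) ++ [a] = pre ++ (s ++ [a]).filter p by
          simp [List.filter_append, hp]]
        exact ih (s ++ [a]) pre hdisj'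
      · have hA : (p a && !((pre ++ s.filter p).contains a)) = false := by
          simp [Bool.eq_false_iff.mpr hp]
        rw [hA]
        simp only [Bool.false_eq_true, if_false]
        rw [show pre ++ s.filter p = pre ++ (s ++ [a]).filter p by
          simp [List.filter_append, Bool.eq_false_iff.mpr hp]]
        exact ih (s ++ [a]) pre hdisj'

-- ===== VERDICT (by name: the statement is the Claim_ definition above) =====
theorem custom_array_operation_spec : Claim_equal_custom_array_operation := by
  intro arr1 arr2 find_common _
  show custom_array_operation arr1 arr2 find_common = custom_array_operation_alt arr1 arr2 find_common
  cases find_common with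
  | true =>
    show arr1.foldl (fun result element =>
        if arr2.contains element && !(result.contains element) then result ++ [element] else result) []
      = (PySem.List.dedup arr1).filter (fun x => PySem.Set.contains (PySem.Set.ofList arr2) x)
    rw [PySem.List.foldl_congr_mem arr1 _
      (fun result element =>
        if PySem.Set.contains (PySem.Set.ofList arr2) element && !(result.contains element)
          then result ++ [element] else result) []
      (by intro acc x _; simp)]
    rw [cao_dedup_eq_foldl]
    have h := cao_fold_filter (fun x => PySem.Set.contains (PySem.Set.ofList arr2) x) arr1 [] []
      (by simp)
    simp only [List.filter_nil, List.nil_append] at h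
    exact h
  | false =>
    show (arr1 ++ arr2).foldl (fun result element =>
        if (arr1.contains element != arr2.contains element) && !(result.contains element) then
          result ++ [element] else result) []
      = (PySem.List.dedup arr1).filter (fun x => !(PySem.Set.contains (PySem.Set.ofList arr2) x))
        ++ (PySem.List.dedup arr2).filter (fun x => !(PySem.Set.contains (PySem.Set.ofList arr1) x))
    rw [List.foldl_append]
    rw [PySem.List.foldl_congr_mem arr1 _
      (fun result element =>
        if !(PySem.Set.contains (PySem.Set.ofList arr2) element) && !(result.contains element)
          then result ++ [element] else result) []
      (by intro acc x hx; simp [List.contains_eq_mem, hx])]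
    have h1 := cao_fold_filter (fun x => !(PySem.Set.contains (PySem.Set.ofList arr2) x)) arr1 [] []
      (by simp)
    simp only [List.filter_nil, List.nil_append] at h1
    rw [h1]
    rw [PySem.List.foldl_congr_mem arr2 _
      (fun result element =>
        if !(PySem.Set.contains (PySem.Set.ofList arr1) element) && !(result.contains element)
          then result ++ [element] else result) _
      (by intro acc x hx; simp [List.contains_eq_mem, hx])]
    have h2 := cao_fold_filter (fun x => !(PySem.Set.contains (PySem.Set.ofList arr1) x)) arr2 []
      ((arr1.foldl (fun t x => if t.contains x then t else t ++ [x]) []).filter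
        (fun x => !(PySem.Set.contains (PySem.Set.ofList arr2) x)))
      (by
        intro x hx hmemf
        have hq := (List.mem_filter.mp hmemf).2
        rw [cao_contains_ofList, List.contains_eq_mem] at hq
        simp [hx] at hq)
    simp only [List.filter_nil, List.append_nil] at h2
    rw [h2]
    rfl
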